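-- pv_equiv track=rewrite | github.com/Glasgow-AI4BioMed/BPP | src/data_processing/extract_data_form_reactome.py | get_entity_components_status_dic_based_on_entity_index_to_list_of_components_dic
-- ===== SOURCE A (Python) =====
-- def get_entity_components_status_dic_based_on_entity_index_to_list_of_components_dic(
--                                                                                      entity_index_to_list_of_components_dic):
--     entity_components_status_dic: {str: int} = {"total_num_of_entities": 0,
--                                                 "num_of_entities_with_one_component": 0,
--                                                 "num_of_entities_with_two_components": 0,
--                                                 "num_of_entities_with_three_components": 0,
--                                                 "num_of_entities_with_four_components": 0,
--                                                 "num_of_entities_with_five_components": 0,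
--                                                 "num_of_entities_with_six_components": 0,
--                                                 "num_of_entities_with_seven_components": 0,
--                                                 "num_of_entities_with_eight_components": 0,
--                                                 "num_of_entities_with_more_than_eight_components": 0}
--
--     dic_key_name: {int: str} = {1: "num_of_entities_with_one_component",
--                                 2: "num_of_entities_with_two_components",
--                                 3: "num_of_entities_with_three_components",
--                                 4: "num_of_entities_with_four_components",
--                                 5: "num_of_entities_with_five_components",
--                                 6: "num_of_entities_with_six_components",
--                                 7: "num_of_entities_with_seven_components",
--                                 8: "num_of_entities_with_eight_components"}
--
--     entity_components_status_dic["total_num_of_entities"] = len(entity_index_to_list_of_components_dic)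
--
--     for entity_index, list_of_components in entity_index_to_list_of_components_dic.items():
--         num_of_components = len(list_of_components)
--         if num_of_components in dic_key_name.keys():
--             key_name = dic_key_name.get(num_of_components)
--             temp_val = entity_components_status_dic.get(key_name)
--             entity_components_status_dic[dic_key_name.get(len(list_of_components))] = temp_val + 1
--         else:
--             temp_val = entity_components_status_dic.get(
--                 "num_of_entities_with_more_than_eight_components")
--             entity_components_status_dic[
--                 "num_of_entities_with_more_than_eight_components"] = temp_val + 1
--
--     return entity_components_status_dic
-- ===== SOURCE B (Python) =====
-- def get_entity_components_status_dic_based_on_entity_index_to_list_of_components_dic(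
--                                                                                      entity_index_to_list_of_components_dic):
--     # Count-per-bucket strategy: no per-entity accumulator at all.  Compute the list
--     # of component-list lengths once, then for each bucket 1..8 COUNT how many
--     # entities have exactly that many components; the overflow bucket (which also
--     # receives entities with 0 components, as in the original) is everything left,
--     # obtained by subtraction rather than by counting.
--     names = ["num_of_entities_with_one_component",
--              "num_of_entities_with_two_components",
--              "num_of_entities_with_three_components",
--              "num_of_entities_with_four_components",
--              "num_of_entities_with_five_components",
--              "num_of_entities_with_six_components",
--              "num_of_entities_with_seven_components",
--              "num_of_entities_with_eight_components",
--              "num_of_entities_with_more_than_eight_components"]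
--     lengths = [len(v) for v in entity_index_to_list_of_components_dic.values()]
--     out = {"total_num_of_entities": len(entity_index_to_list_of_components_dic)}
--     counted = 0
--     for k in range(1, 9):
--         c = lengths.count(k)
--         out[names[k - 1]] = c
--         counted += c
--     out[names[8]] = len(lengths) - counted
--     return out
-- ===== Notes on version B (the rewrite author's own statement) =====
-- stated objective: alternative
-- what changed: Replaces A's single per-entity loop that bumps dict counters via a reverse int-to-name lookup by a count-per-bucket strategy: build the list of component-list lengths once, then for each bucket 1..8 take lengths.count(k), and obtain the overflow bucket by subtraction (total minus counted) instead of counting it.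
import Mathlib
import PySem

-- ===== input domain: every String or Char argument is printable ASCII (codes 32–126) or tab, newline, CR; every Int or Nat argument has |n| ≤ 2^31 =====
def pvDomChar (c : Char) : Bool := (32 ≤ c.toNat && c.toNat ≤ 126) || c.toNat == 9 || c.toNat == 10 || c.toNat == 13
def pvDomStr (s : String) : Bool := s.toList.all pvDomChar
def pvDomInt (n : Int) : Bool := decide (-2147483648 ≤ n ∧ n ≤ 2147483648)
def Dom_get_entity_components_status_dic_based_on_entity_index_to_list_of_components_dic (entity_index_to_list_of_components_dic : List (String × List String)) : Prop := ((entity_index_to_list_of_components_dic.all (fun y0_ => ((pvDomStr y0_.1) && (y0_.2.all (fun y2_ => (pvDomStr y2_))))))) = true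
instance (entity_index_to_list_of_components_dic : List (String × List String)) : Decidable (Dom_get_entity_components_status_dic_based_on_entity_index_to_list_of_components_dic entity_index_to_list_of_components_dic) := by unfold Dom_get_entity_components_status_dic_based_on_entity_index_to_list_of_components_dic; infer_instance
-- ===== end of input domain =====

-- B replaces A's per-entity counter-bumping loop by a count-per-bucket strategy:
-- compute the list of lengths once, take lengths.count(k) for each bucket 1..8, and
-- obtain the overflow bucket by subtraction (objective: alternative; same linear cost).

-- ===== PORT A =====
def get_entity_components_status_dic_based_on_entity_index_to_list_of_components_dic (entity_index_to_list_of_components_dic : List (String × List String)) : List (String × Int) :=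
  let entity_components_status_dic : PySem.Dict String Int := PySem.Dict.ofList
    [("total_num_of_entities", 0),
     ("num_of_entities_with_one_component", 0),
     ("num_of_entities_with_two_components", 0),
     ("num_of_entities_with_three_components", 0),
     ("num_of_entities_with_four_components", 0),
     ("num_of_entities_with_five_components", 0),
     ("num_of_entities_with_six_components", 0),
     ("num_of_entities_with_seven_components", 0),
     ("num_of_entities_with_eight_components", 0),
     ("num_of_entities_with_more_than_eight_components", 0)]
  let dic_key_name : PySem.Dict Int String := PySem.Dict.ofList
    [(1, "num_of_entities_with_one_component"),
     (2, "num_of_entities_with_two_components"),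
     (3, "num_of_entities_with_three_components"),
     (4, "num_of_entities_with_four_components"),
     (5, "num_of_entities_with_five_components"),
     (6, "num_of_entities_with_six_components"),
     (7, "num_of_entities_with_seven_components"),
     (8, "num_of_entities_with_eight_components")]
  let entity_components_status_dic :=
    entity_components_status_dic.insert "total_num_of_entities" (entity_index_to_list_of_components_dic.length : Int)
  let entity_components_status_dic :=
    entity_index_to_list_of_components_dic.foldl (fun d p =>
      let num_of_components : Int := (p.2.length : Int)
      if (dic_key_name.keys).contains num_of_components then
        -- dic_key_name.get / entity_components_status_dic.get: keys are guaranteed present here,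
        -- so Python's .get never yields None; ported with getD.
        let key_name : String := (dic_key_name.get? num_of_components).getD ""
        let temp_val : Int := (d.get? key_name).getD 0
        d.insert ((dic_key_name.get? ((p.2.length : Int))).getD "") (temp_val + 1)
      else
        let temp_val : Int := (d.get? "num_of_entities_with_more_than_eight_components").getD 0
        d.insert "num_of_entities_with_more_than_eight_components" (temp_val + 1))
      entity_components_status_dic
  entity_components_status_dic.items

-- ===== PORT B =====
def get_entity_components_status_dic_based_on_entity_index_to_list_of_components_dic_alt (entity_index_to_list_of_components_dic : List (String × List String)) : List (String × Int) :=
  let names : List String :=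
    ["num_of_entities_with_one_component",
     "num_of_entities_with_two_components",
     "num_of_entities_with_three_components",
     "num_of_entities_with_four_components",
     "num_of_entities_with_five_components",
     "num_of_entities_with_six_components",
     "num_of_entities_with_seven_components",
     "num_of_entities_with_eight_components",
     "num_of_entities_with_more_than_eight_components"]
  let lengths : List Int := entity_index_to_list_of_components_dic.map (fun p => (p.2.length : Int))
  let out : PySem.Dict String Int :=
    PySem.Dict.ofList [("total_num_of_entities", (entity_index_to_list_of_components_dic.length : Int))]
  -- for k in range(1, 9): count that bucket and track how many entities are accounted for
  let s := (PySem.List.pyRange 1 9 1).foldl (fun (s : PySem.Dict String Int × Int) k =>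
      let c : Int := lengths.count k
      (s.1.insert (PySem.List.pyGetD names (k - 1) "") c, s.2 + c)) (out, 0)
  -- overflow bucket (which also receives entities with 0 components, as in A) by subtraction
  (s.1.insert (PySem.List.pyGetD names 8 "") ((lengths.length : Int) - s.2)).items

-- ===== PRECONDITION & SPEC =====
def Spec_get_entity_components_status_dic_based_on_entity_index_to_list_of_components_dic (entity_index_to_list_of_components_dic : List (String × List String)) (out : List (String × Int)) : Prop := out = get_entity_components_status_dic_based_on_entity_index_to_list_of_components_dic_alt entity_index_to_list_of_components_dic
instance (entity_index_to_list_of_components_dic : List (String × List String)) (out : List (String × Int)) : Decidable (Spec_get_entity_components_status_dic_based_on_entity_index_to_list_of_components_dic entity_index_to_list_of_components_dic out) := by unfold Spec_get_entity_components_status_dic_based_on_entity_index_to_list_of_components_dic; infer_instance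

-- ===== CLAIM (what is proved, stated in full; the proofs are below) =====
def Claim_equal_get_entity_components_status_dic_based_on_entity_index_to_list_of_components_dic : Prop := ∀ (entity_index_to_list_of_components_dic : List (String × List String)), Dom_get_entity_components_status_dic_based_on_entity_index_to_list_of_components_dic entity_index_to_list_of_components_dic → Spec_get_entity_components_status_dic_based_on_entity_index_to_list_of_components_dic entity_index_to_list_of_components_dic (get_entity_components_status_dic_based_on_entity_index_to_list_of_components_dic entity_index_to_list_of_components_dic)

-- ===== LEMMAS AND PROOFS =====

-- the canonical shape of A's running dict: the total, then the nine counters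
def pvCanon (t a1 a2 a3 a4 a5 a6 a7 a8 a9 : Int) : PySem.Dict String Int :=
  PySem.Dict.mk
    [("total_num_of_entities", t),
     ("num_of_entities_with_one_component", a1),
     ("num_of_entities_with_two_components", a2),
     ("num_of_entities_with_three_components", a3),
     ("num_of_entities_with_four_components", a4),
     ("num_of_entities_with_five_components", a5),
     ("num_of_entities_with_six_components", a6),
     ("num_of_entities_with_seven_components", a7),
     ("num_of_entities_with_eight_components", a8),
     ("num_of_entities_with_more_than_eight_components", a9)]

-- A's dic_key_name, named for the lemmas (definitionally the one inside port A)
def pvKeyName : PySem.Dict Int String := PySem.Dict.ofList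
    [(1, "num_of_entities_with_one_component"),
     (2, "num_of_entities_with_two_components"),
     (3, "num_of_entities_with_three_components"),
     (4, "num_of_entities_with_four_components"),
     (5, "num_of_entities_with_five_components"),
     (6, "num_of_entities_with_six_components"),
     (7, "num_of_entities_with_seven_components"),
     (8, "num_of_entities_with_eight_components")]

-- A's loop body, named (definitionally the lambda in port A)
def pvAstep (d : PySem.Dict String Int) (p : String × List String) : PySem.Dict String Int :=
  let num_of_components : Int := (p.2.length : Int)
  if (pvKeyName.keys).contains num_of_components then
    let key_name : String := (pvKeyName.get? num_of_components).getD ""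
    let temp_val : Int := (d.get? key_name).getD 0
    d.insert ((pvKeyName.get? ((p.2.length : Int))).getD "") (temp_val + 1)
  else
    let temp_val : Int := (d.get? "num_of_entities_with_more_than_eight_components").getD 0
    d.insert "num_of_entities_with_more_than_eight_components" (temp_val + 1)

-- the per-bucket count B computes: occurrences of k among the component-list lengths
def pvCnt (xs : List (String × List String)) (k : Int) : Int :=
  (xs.map (fun p => ((p.2.length : Int)))).count k

-- overflow branch of A's step: lengths ≥ 9 miss dic_key_name
lemma pvAstep_overflow (t a1 a2 a3 a4 a5 a6 a7 a8 a9 : Int) (k : String) (c : List String)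
    (m : Nat) (h : c.length = m + 9) :
    pvAstep (pvCanon t a1 a2 a3 a4 a5 a6 a7 a8 a9) (k, c) =
      pvCanon t a1 a2 a3 a4 a5 a6 a7 a8 (a9 + 1) := by
  have hc : (pvKeyName.keys).contains ((m + 9 : Nat) : Int) = false := by
    have hk : pvKeyName.keys = [1, 2, 3, 4, 5, 6, 7, 8] := rfl
    rw [hk]
    simp only [List.contains_eq_mem, List.mem_cons, List.not_mem_nil, decide_eq_false_iff_not]
    push_cast
    intro hmem
    rcases hmem with h' | h' | h' | h' | h' | h' | h' | h' | h' <;> omega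
  simp only [pvAstep, h, hc, Bool.false_eq_true, if_false]
  rfl

-- how pvCnt unfolds over a cons cell
lemma pvCnt_cons (xs : List (String × List String)) (p : String × List String) (J : Int) :
    pvCnt (p :: xs) J = pvCnt xs J + (if ((p.2.length : Int) == J) then 1 else 0) := by
  simp [pvCnt, List.count_cons]

-- the loop invariant: A's fold from the canonical dict fills in B's per-bucket counts,
-- with the overflow slot obtained by subtraction, exactly as B computes it
lemma pv_loopA (xs : List (String × List String)) :
    ∀ (t a1 a2 a3 a4 a5 a6 a7 a8 a9 : Int),
      xs.foldl pvAstep (pvCanon t a1 a2 a3 a4 a5 a6 a7 a8 a9) =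
        pvCanon t (a1 + pvCnt xs 1) (a2 + pvCnt xs 2) (a3 + pvCnt xs 3) (a4 + pvCnt xs 4)
          (a5 + pvCnt xs 5) (a6 + pvCnt xs 6) (a7 + pvCnt xs 7) (a8 + pvCnt xs 8)
          (a9 + ((xs.length : Int) - (pvCnt xs 1 + pvCnt xs 2 + pvCnt xs 3 + pvCnt xs 4 +
                 pvCnt xs 5 + pvCnt xs 6 + pvCnt xs 7 + pvCnt xs 8))) := by
  induction xs with
  | nil =>
    intro t a1 a2 a3 a4 a5 a6 a7 a8 a9
    simp [pvCnt]
  | cons p xs ih =>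
    intro t a1 a2 a3 a4 a5 a6 a7 a8 a9
    obtain ⟨k, c⟩ := p
    simp only [List.foldl_cons]
    obtain ⟨n, hn⟩ : ∃ n, c.length = n := ⟨_, rfl⟩
    rcases n with _ | _ | _ | _ | _ | _ | _ | _ | _ | m
    case zero =>
      rw [show pvAstep (pvCanon t a1 a2 a3 a4 a5 a6 a7 a8 a9) (k, c) =
            pvCanon t a1 a2 a3 a4 a5 a6 a7 a8 (a9 + 1) from by simp only [pvAstep, hn]; rfl,
          ih]
      simp only [pvCanon, PySem.Dict.mk.injEq, List.cons.injEq, Prod.mk.injEq,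
        true_and, and_true, pvCnt_cons, hn, List.length_cons]
      norm_num
      omega
    case succ.zero =>
      rw [show pvAstep (pvCanon t a1 a2 a3 a4 a5 a6 a7 a8 a9) (k, c) =
            pvCanon t (a1 + 1) a2 a3 a4 a5 a6 a7 a8 a9 from by simp only [pvAstep, hn]; rfl,
          ih]
      simp only [pvCanon, PySem.Dict.mk.injEq, List.cons.injEq, Prod.mk.injEq,
        true_and, and_true, pvCnt_cons, hn, List.length_cons]
      norm_num
      omega
    case succ.succ.zero =>
      rw [show pvAstep (pvCanon t a1 a2 a3 a4 a5 a6 a7 a8 a9) (k, c) =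
            pvCanon t a1 (a2 + 1) a3 a4 a5 a6 a7 a8 a9 from by simp only [pvAstep, hn]; rfl,
          ih]
      simp only [pvCanon, PySem.Dict.mk.injEq, List.cons.injEq, Prod.mk.injEq,
        true_and, and_true, pvCnt_cons, hn, List.length_cons]
      norm_num
      omega
    case succ.succ.succ.zero =>
      rw [show pvAstep (pvCanon t a1 a2 a3 a4 a5 a6 a7 a8 a9) (k, c) =
            pvCanon t a1 a2 (a3 + 1) a4 a5 a6 a7 a8 a9 from by simp only [pvAstep, hn]; rfl,
          ih]
      simp only [pvCanon, PySem.Dict.mk.injEq, List.cons.injEq, Prod.mk.injEq,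
        true_and, and_true, pvCnt_cons, hn, List.length_cons]
      norm_num
      omega
    case succ.succ.succ.succ.zero =>
      rw [show pvAstep (pvCanon t a1 a2 a3 a4 a5 a6 a7 a8 a9) (k, c) =
            pvCanon t a1 a2 a3 (a4 + 1) a5 a6 a7 a8 a9 from by simp only [pvAstep, hn]; rfl,
          ih]
      simp only [pvCanon, PySem.Dict.mk.injEq, List.cons.injEq, Prod.mk.injEq,
        true_and, and_true, pvCnt_cons, hn, List.length_cons]
      norm_num
      omega
    case succ.succ.succ.succ.succ.zero =>
      rw [show pvAstep (pvCanon t a1 a2 a3 a4 a5 a6 a7 a8 a9) (k, c) =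
            pvCanon t a1 a2 a3 a4 (a5 + 1) a6 a7 a8 a9 from by simp only [pvAstep, hn]; rfl,
          ih]
      simp only [pvCanon, PySem.Dict.mk.injEq, List.cons.injEq, Prod.mk.injEq,
        true_and, and_true, pvCnt_cons, hn, List.length_cons]
      norm_num
      omega
    case succ.succ.succ.succ.succ.succ.zero =>
      rw [show pvAstep (pvCanon t a1 a2 a3 a4 a5 a6 a7 a8 a9) (k, c) =
            pvCanon t a1 a2 a3 a4 a5 (a6 + 1) a7 a8 a9 from by simp only [pvAstep, hn]; rfl,
          ih]
      simp only [pvCanon, PySem.Dict.mk.injEq, List.cons.injEq, Prod.mk.injEq,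
        true_and, and_true, pvCnt_cons, hn, List.length_cons]
      norm_num
      omega
    case succ.succ.succ.succ.succ.succ.succ.zero =>
      rw [show pvAstep (pvCanon t a1 a2 a3 a4 a5 a6 a7 a8 a9) (k, c) =
            pvCanon t a1 a2 a3 a4 a5 a6 (a7 + 1) a8 a9 from by simp only [pvAstep, hn]; rfl,
          ih]
      simp only [pvCanon, PySem.Dict.mk.injEq, List.cons.injEq, Prod.mk.injEq,
        true_and, and_true, pvCnt_cons, hn, List.length_cons]
      norm_num
      omega
    case succ.succ.succ.succ.succ.succ.succ.succ.zero =>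
      rw [show pvAstep (pvCanon t a1 a2 a3 a4 a5 a6 a7 a8 a9) (k, c) =
            pvCanon t a1 a2 a3 a4 a5 a6 a7 (a8 + 1) a9 from by simp only [pvAstep, hn]; rfl,
          ih]
      simp only [pvCanon, PySem.Dict.mk.injEq, List.cons.injEq, Prod.mk.injEq,
        true_and, and_true, pvCnt_cons, hn, List.length_cons]
      norm_num
      omega
    case succ.succ.succ.succ.succ.succ.succ.succ.succ =>
      rw [pvAstep_overflow t a1 a2 a3 a4 a5 a6 a7 a8 a9 k c m hn, ih]
      simp only [pvCanon, PySem.Dict.mk.injEq, List.cons.injEq, Prod.mk.injEq,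
        true_and, and_true, pvCnt_cons, hn, List.length_cons]
      have h9 : ∀ J : Int, 1 ≤ J → J ≤ 8 → (((m + 9 : Nat) : Int) == J) = false := by
        intro J h1 h8
        simp only [beq_eq_false_iff_ne, ne_eq]
        push_cast
        omega
      rw [h9 1 (by omega) (by omega), h9 2 (by omega) (by omega), h9 3 (by omega) (by omega),
          h9 4 (by omega) (by omega), h9 5 (by omega) (by omega), h9 6 (by omega) (by omega),
          h9 7 (by omega) (by omega), h9 8 (by omega) (by omega)]
      norm_num
      omega

-- appending the nine fresh counter keys to the dict that holds the total gives the canonical dict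
lemma pv_chain (n v1 v2 v3 v4 v5 v6 v7 v8 ov : Int) :
    (((((((((PySem.Dict.ofList [("total_num_of_entities", n)]).insert
      "num_of_entities_with_one_component" v1).insert
      "num_of_entities_with_two_components" v2).insert
      "num_of_entities_with_three_components" v3).insert
      "num_of_entities_with_four_components" v4).insert
      "num_of_entities_with_five_components" v5).insert
      "num_of_entities_with_six_components" v6).insert
      "num_of_entities_with_seven_components" v7).insert
      "num_of_entities_with_eight_components" v8).insert
      "num_of_entities_with_more_than_eight_components" ov =
      pvCanon n v1 v2 v3 v4 v5 v6 v7 v8 ov := by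
  apply PySem.Dict.ext
  have h0 : (PySem.Dict.ofList [("total_num_of_entities", n)] : PySem.Dict String Int)
      = PySem.Dict.mk [("total_num_of_entities", n)] := rfl
  rw [h0]
  rw [PySem.Dict.items_insert_of_not_contains _ _ (by simp [PySem.Dict.contains_insert])]
  rw [PySem.Dict.items_insert_of_not_contains _ _ (by simp [PySem.Dict.contains_insert])]
  rw [PySem.Dict.items_insert_of_not_contains _ _ (by simp [PySem.Dict.contains_insert])]
  rw [PySem.Dict.items_insert_of_not_contains _ _ (by simp [PySem.Dict.contains_insert])]
  rw [PySem.Dict.items_insert_of_not_contains _ _ (by simp [PySem.Dict.contains_insert])]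
  rw [PySem.Dict.items_insert_of_not_contains _ _ (by simp [PySem.Dict.contains_insert])]
  rw [PySem.Dict.items_insert_of_not_contains _ _ (by simp [PySem.Dict.contains_insert])]
  rw [PySem.Dict.items_insert_of_not_contains _ _ (by simp [PySem.Dict.contains_insert])]
  rw [PySem.Dict.items_insert_of_not_contains _ _ (by simp)]
  rfl


-- B's result, in canonical form
set_option maxHeartbeats 1000000 in
lemma pv_alt_eq (xs : List (String × List String)) :
    get_entity_components_status_dic_based_on_entity_index_to_list_of_components_dic_alt xs =
      (pvCanon (xs.length : Int) (pvCnt xs 1) (pvCnt xs 2) (pvCnt xs 3) (pvCnt xs 4)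
        (pvCnt xs 5) (pvCnt xs 6) (pvCnt xs 7) (pvCnt xs 8)
        ((xs.length : Int) - (pvCnt xs 1 + pvCnt xs 2 + pvCnt xs 3 + pvCnt xs 4 +
          pvCnt xs 5 + pvCnt xs 6 + pvCnt xs 7 + pvCnt xs 8))).items := by
  simp only [get_entity_components_status_dic_based_on_entity_index_to_list_of_components_dic_alt]
  rw [show PySem.List.pyRange 1 9 1 = [1,2,3,4,5,6,7,8] from by decide]
  simp only [List.foldl_cons, List.foldl_nil]
  norm_num
  rw [show PySem.List.pyGetD ["num_of_entities_with_one_component", "num_of_entities_with_two_components", "num_of_entities_with_three_components", "num_of_entities_with_four_components", "num_of_entities_with_five_components", "num_of_entities_with_six_components", "num_of_entities_with_seven_components", "num_of_entities_with_eight_components", "num_of_entities_with_more_than_eight_components"] (1:Int) "" = "num_of_entities_with_two_components" from by decide,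
      show PySem.List.pyGetD ["num_of_entities_with_one_component", "num_of_entities_with_two_components", "num_of_entities_with_three_components", "num_of_entities_with_four_components", "num_of_entities_with_five_components", "num_of_entities_with_six_components", "num_of_entities_with_seven_components", "num_of_entities_with_eight_components", "num_of_entities_with_more_than_eight_components"] (2:Int) "" = "num_of_entities_with_three_components" from by decide,
      show PySem.List.pyGetD ["num_of_entities_with_one_component", "num_of_entities_with_two_components", "num_of_entities_with_three_components", "num_of_entities_with_four_components", "num_of_entities_with_five_components", "num_of_entities_with_six_components", "num_of_entities_with_seven_components", "num_of_entities_with_eight_components", "num_of_entities_with_more_than_eight_components"] (3:Int) "" = "num_of_entities_with_four_components" from by decide,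
      show PySem.List.pyGetD ["num_of_entities_with_one_component", "num_of_entities_with_two_components", "num_of_entities_with_three_components", "num_of_entities_with_four_components", "num_of_entities_with_five_components", "num_of_entities_with_six_components", "num_of_entities_with_seven_components", "num_of_entities_with_eight_components", "num_of_entities_with_more_than_eight_components"] (4:Int) "" = "num_of_entities_with_five_components" from by decide,
      show PySem.List.pyGetD ["num_of_entities_with_one_component", "num_of_entities_with_two_components", "num_of_entities_with_three_components", "num_of_entities_with_four_components", "num_of_entities_with_five_components", "num_of_entities_with_six_components", "num_of_entities_with_seven_components", "num_of_entities_with_eight_components", "num_of_entities_with_more_than_eight_components"] (5:Int) "" = "num_of_entities_with_six_components" from by decide,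
      show PySem.List.pyGetD ["num_of_entities_with_one_component", "num_of_entities_with_two_components", "num_of_entities_with_three_components", "num_of_entities_with_four_components", "num_of_entities_with_five_components", "num_of_entities_with_six_components", "num_of_entities_with_seven_components", "num_of_entities_with_eight_components", "num_of_entities_with_more_than_eight_components"] (6:Int) "" = "num_of_entities_with_seven_components" from by decide,
      show PySem.List.pyGetD ["num_of_entities_with_one_component", "num_of_entities_with_two_components", "num_of_entities_with_three_components", "num_of_entities_with_four_components", "num_of_entities_with_five_components", "num_of_entities_with_six_components", "num_of_entities_with_seven_components", "num_of_entities_with_eight_components", "num_of_entities_with_more_than_eight_components"] (7:Int) "" = "num_of_entities_with_eight_components" from by decide,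
      show PySem.List.pyGetD ["num_of_entities_with_one_component", "num_of_entities_with_two_components", "num_of_entities_with_three_components", "num_of_entities_with_four_components", "num_of_entities_with_five_components", "num_of_entities_with_six_components", "num_of_entities_with_seven_components", "num_of_entities_with_eight_components", "num_of_entities_with_more_than_eight_components"] (8:Int) "" = "num_of_entities_with_more_than_eight_components" from by decide]
  rw [pv_chain]
  simp only [pvCanon, pvCnt]

-- ===== VERDICT (by name: the statement is the Claim_ definition above) =====
theorem get_entity_components_status_dic_based_on_entity_index_to_list_of_components_dic_spec : Claim_equal_get_entity_components_status_dic_based_on_entity_index_to_list_of_components_dic := by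
  intro xs _
  show _ = _
  rw [pv_alt_eq]
  show (xs.foldl pvAstep (pvCanon (xs.length : Int) 0 0 0 0 0 0 0 0 0)).items = _
  rw [pv_loopA]
  norm_num
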